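-- pv_equiv track=rewrite | github.com/bbest31/BerkeleyDB | phase3.py | operandIndex
-- ===== SOURCE A (Python) =====
-- def operandIndex(clause):
--    for c in clause:
--       if(c == ":"):
--          return clause.index(c)
--       elif(c == ">"):
--          return clause.index(c)
--       elif(c == "<"):
--          return clause.index(c)
--    return None
-- ===== SOURCE B (Python) =====
-- def operandIndex(clause):
--     positions = [clause.find(op) for op in ":><"]
--     hits = [p for p in positions if p != -1]
--     return min(hits) if hits else None
-- ===== Notes on version B (the rewrite author's own statement) =====
-- stated objective: faster
-- what changed: Replaces the fused per-character left-to-right scan with early return by three independent str.find passes (one per operator character) whose non-(-1) results are combined with min.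
import Mathlib
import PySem

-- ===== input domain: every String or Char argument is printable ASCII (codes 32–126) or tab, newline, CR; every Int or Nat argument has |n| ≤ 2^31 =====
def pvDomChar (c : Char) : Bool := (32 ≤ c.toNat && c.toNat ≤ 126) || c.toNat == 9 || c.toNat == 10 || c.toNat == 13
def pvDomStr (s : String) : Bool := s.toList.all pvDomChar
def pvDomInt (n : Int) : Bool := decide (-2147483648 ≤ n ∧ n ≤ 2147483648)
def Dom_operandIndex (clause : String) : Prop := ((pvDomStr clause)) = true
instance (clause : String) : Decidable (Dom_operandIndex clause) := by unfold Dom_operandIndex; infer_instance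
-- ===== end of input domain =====

-- B replaces A's fused scan-with-early-return by three per-character find passes combined with min (alternative decomposition, same result).


-- ===== PORT A =====
-- the for-loop over the characters of clause; clause.index(c) is exact here because
-- c is a character of clause, so Python's str.index cannot raise and equals str.find
def operandIndexLoop (clause : List Char) : List Char → Option Int
  | [] => none
  | c :: rest =>
    if c = ':' then some (PySem.Chars.find clause [c])
    else if c = '>' then some (PySem.Chars.find clause [c])
    else if c = '<' then some (PySem.Chars.find clause [c])
    else operandIndexLoop clause rest

def operandIndex (clause : String) : Option Int :=
  operandIndexLoop clause.toList clause.toList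

-- ===== PORT B =====
def operandIndex_alt (clause : String) : Option Int :=
  let positions := [':', '>', '<'].map (fun op => PySem.Chars.find clause.toList [op])
  let hits := positions.filter (fun p => p ≠ -1)
  if hits.isEmpty then none else PySem.List.min? hits (fun p => p)

-- ===== PRECONDITION & SPEC =====
def Spec_operandIndex (clause : String) (out : Option Int) : Prop := out = operandIndex_alt clause
instance (clause : String) (out : Option Int) : Decidable (Spec_operandIndex clause out) := by unfold Spec_operandIndex; infer_instance

-- ===== CLAIM (what is proved, stated in full; the proofs are below) =====
def Claim_equal_operandIndex : Prop := ∀ (clause : String), Dom_operandIndex clause → Spec_operandIndex clause (operandIndex clause)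

-- ===== LEMMAS AND PROOFS =====

/-- first index of a character satisfying `p` -/
def firstIdx (p : Char → Bool) : List Char → Option Nat
  | [] => none
  | a :: t => if p a then some 0 else (firstIdx p t).map (· + 1)

def isOp (c : Char) : Bool := (c == ':') || ((c == '>') || (c == '<'))

def omin : Option Nat → Option Nat → Option Nat
  | none, y => y
  | some i, none => some i
  | some i, some j => some (min i j)

theorem find_go_single (c : Char) : ∀ (l : List Char) (k : Nat),
    PySem.Chars.find.go [c] l k =
      (match firstIdx (fun a => a == c) l with
       | none => (-1 : Int)
       | some j => ((k + j : Nat) : Int))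
  | [], k => by simp [PySem.Chars.find.go, firstIdx]
  | a :: t, k => by
    by_cases h : a = c
    · simp [PySem.Chars.find.go, firstIdx, h, List.isPrefixOf]
    · simp only [PySem.Chars.find.go, firstIdx, List.isPrefixOf, h,
        beq_iff_eq, if_false, Bool.and_eq_true]
      rw [find_go_single c t (k + 1)]
      have h' : ¬ c = a := fun hh => h hh.symm
      cases firstIdx (fun a => a == c) t
      · simp [h']
      · simp [h']
        ring

theorem find_single (c : Char) (l : List Char) :
    PySem.Chars.find l [c] =
      (match firstIdx (fun a => a == c) l with
       | none => (-1 : Int)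
       | some j => (j : Int)) := by
  show PySem.Chars.find.go [c] l 0 = _
  rw [find_go_single]
  cases firstIdx (fun a => a == c) l <;> simp

theorem firstIdx_append (p : Char → Bool) (pre t : List Char)
    (h : ∀ a ∈ pre, p a = false) :
    firstIdx p (pre ++ t) = (firstIdx p t).map (· + pre.length) := by
  induction pre with
  | nil => simp
  | cons a pre ih =>
    have ha := h a (by simp)
    simp only [List.cons_append, firstIdx, ha, Bool.false_eq_true, if_false]
    rw [ih (fun a ha' => h a (by simp [ha']))]
    cases firstIdx p t <;> simp <;> omega

theorem firstIdx_or (p q : Char → Bool) (l : List Char) :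
    firstIdx (fun a => p a || q a) l = omin (firstIdx p l) (firstIdx q l) := by
  induction l with
  | nil => simp [firstIdx, omin]
  | cons a t ih =>
    simp only [firstIdx, ih]
    by_cases hp : p a <;> by_cases hq : q a <;>
      simp only [hp, hq, Bool.true_or, Bool.false_or, if_true] <;>
      cases firstIdx p t <;> cases firstIdx q t <;> simp [omin]

theorem firstIdx_eq_none (p : Char → Bool) (l : List Char)
    (h : ∀ a ∈ l, p a = false) : firstIdx p l = none := by
  induction l with
  | nil => rfl
  | cons a t ih =>
    simp only [firstIdx, h a (by simp), if_false]
    rw [ih (fun a ha => h a (by simp [ha]))]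
    rfl

theorem op_case (c : Char) (pre rest : List Char) (hc : isOp c = true)
    (h : ∀ a ∈ pre, isOp a = false) :
    some (PySem.Chars.find (pre ++ c :: rest) [c])
      = (firstIdx isOp (pre ++ c :: rest)).map (fun n => (n : Int)) := by
  have hpc : ∀ a ∈ pre, (a == c) = false := by
    intro a ha
    have := h a ha
    simp only [beq_eq_false_iff_ne, ne_eq]
    rintro rfl
    rw [hc] at this
    cases this
  rw [find_single, firstIdx_append _ _ _ hpc, firstIdx_append isOp _ _ h]
  simp [firstIdx, hc]

theorem loop_eq : ∀ (rest pre : List Char), (∀ a ∈ pre, isOp a = false) →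
    operandIndexLoop (pre ++ rest) rest
      = (firstIdx isOp (pre ++ rest)).map (fun n => (n : Int))
  | [], pre, h => by
    rw [firstIdx_eq_none isOp (pre ++ []) (by simpa using h)]
    rfl
  | c :: rest, pre, h => by
    by_cases h1 : c = ':'
    · subst h1
      simp only [operandIndexLoop, if_true]
      exact op_case _ pre rest rfl h
    · by_cases h2 : c = '>'
      · subst h2
        simp only [operandIndexLoop, h1, if_false, if_true]
        exact op_case _ pre rest rfl h
      · by_cases h3 : c = '<'
        · subst h3
          simp only [operandIndexLoop, h1, h2, if_false, if_true]
          exact op_case _ pre rest rfl h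
        · have hop : isOp c = false := by
            simp [isOp, h1, h2, h3]
          have hext : ∀ a ∈ pre ++ [c], isOp a = false := by
            intro a ha
            rcases List.mem_append.1 ha with ha | ha
            · exact h a ha
            · simp at ha; subst ha; exact hop
          have heq : pre ++ c :: rest = (pre ++ [c]) ++ rest := by simp
          simp only [operandIndexLoop, h1, h2, h3, if_false]
          rw [heq, loop_eq rest (pre ++ [c]) hext]

theorem alt_eq (clause : String) :
    operandIndex_alt clause = (firstIdx isOp clause.toList).map (fun n => (n : Int)) := by
  have hiso : isOp = fun a => (a == ':') || ((a == '>') || (a == '<')) := rfl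
  rw [hiso, firstIdx_or, firstIdx_or]
  show (if _ then _ else _) = _
  simp only [List.map_cons, List.map_nil, find_single]
  rcases firstIdx (fun a => a == ':') clause.toList with _ | i <;>
    rcases firstIdx (fun a => a == '>') clause.toList with _ | j <;>
      rcases firstIdx (fun a => a == '<') clause.toList with _ | k <;>
        simp [omin, PySem.List.min?, List.filter, Nat.min_def] <;>
          split_ifs <;> simp <;> omega

-- ===== VERDICT (by name: the statement is the Claim_ definition above) =====
theorem operandIndex_spec : Claim_equal_operandIndex := by
  intro clause _
  show operandIndex clause = operandIndex_alt clause
  rw [alt_eq]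
  exact loop_eq clause.toList [] (by simp)
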